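-- pv_equiv track=rewrite | github.com/fosslight/fosslight_util | src/fosslight_util/download.py | _strip_known_archive_suffixes
-- ===== SOURCE A (Python) =====
-- compression_extension = {".tar.bz2", ".tar.gz", ".tar.xz", ".tgz", ".tar", ".zip", ".jar", ".bz2", ".whl"}
--
-- def _strip_known_archive_suffixes(filename: str) -> str:
--     """Remove trailing compression/archive extensions (e.g. bison-3.8.2.tar.xz -> bison-3.8.2)."""
--     name = filename
--     while name:
--         low = name.lower()
--         stripped = False
--         for ext in sorted(compression_extension, key=len, reverse=True):
--             if low.endswith(ext):
--                 name = name[: -len(ext)]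
--                 stripped = True
--                 break
--         if not stripped:
--             break
--     return name
-- ===== SOURCE B (Python) =====
-- compression_extension = {".tar.bz2", ".tar.gz", ".tar.xz", ".tgz", ".tar", ".zip", ".jar", ".bz2", ".whl"}
--
-- # single-token extensions: strippable whenever they are the last dot-separated token
-- _SINGLE = frozenset({"tgz", "tar", "zip", "jar", "bz2", "whl"})
--
-- def _strip_known_archive_suffixes(filename: str) -> str:
--     """Remove trailing compression/archive extensions (e.g. bison-3.8.2.tar.xz -> bison-3.8.2)."""
--     parts = filename.split(".")
--     while len(parts) >= 2:
--         last = parts[-1].lower()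
--         if last in _SINGLE:
--             parts.pop()
--         elif last in ("gz", "xz") and len(parts) >= 3 and parts[-2].lower() == "tar":
--             parts.pop()
--             parts.pop()
--         else:
--             break
--     return ".".join(parts)
-- ===== Notes on version B (the rewrite author's own statement) =====
-- stated objective: alternative
-- what changed: B splits the filename once into its dot-separated tokens, repeatedly pops whole trailing tokens that name known extensions (popping the token pair for tar.gz/tar.xz), and rejoins with the dot separator, instead of A's loop that re-lowercases the remaining string each pass and scans nine endswith checks over sorted extensions.
import Mathlib
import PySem

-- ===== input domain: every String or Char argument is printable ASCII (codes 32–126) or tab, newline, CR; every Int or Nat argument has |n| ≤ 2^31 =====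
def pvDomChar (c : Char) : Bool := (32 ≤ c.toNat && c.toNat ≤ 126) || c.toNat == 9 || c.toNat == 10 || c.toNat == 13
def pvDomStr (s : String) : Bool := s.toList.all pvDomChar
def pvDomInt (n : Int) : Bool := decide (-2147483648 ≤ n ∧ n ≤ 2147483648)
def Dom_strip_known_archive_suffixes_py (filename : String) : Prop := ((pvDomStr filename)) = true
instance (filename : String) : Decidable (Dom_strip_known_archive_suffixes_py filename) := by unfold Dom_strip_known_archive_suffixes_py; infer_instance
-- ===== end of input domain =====

-- B splits the filename once into dot-separated tokens, pops whole trailing tokens that name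
-- known extensions (a token pair for tar.gz/tar.xz), and rejoins (objective: alternative).

-- ===== PORT A =====
def compression_extension : PySem.Set String :=
  PySem.Set.ofList [".tar.bz2", ".tar.gz", ".tar.xz", ".tgz", ".tar", ".zip", ".jar", ".bz2", ".whl"]

-- sorted(compression_extension, key=len, reverse=True); a fixed value, computed once per loop pass in A
def extsA : List String :=
  PySem.List.sorted compression_extension (fun e => PySem.Str.len e) true

-- used by the termination proof of stripLoopA (cited in decreasing_by)
theorem slice_to_neg_len_lt (xs : List Char) (k : Nat) (hxs : xs ≠ []) :
    (PySem.List.slice xs none (some (-(k : Int)))).length < xs.length := by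
  have hlen : 0 < xs.length := List.length_pos_iff.mpr hxs
  cases k with
  | zero =>
      have : PySem.List.slice xs none (some ((0 : Int))) = xs.take (0 : Nat) := by
        simpa using PySem.List.slice_to_natCast xs 0
      simpa [this] using hlen
  | succ m =>
      rw [PySem.List.slice_to_neg_natCast xs (m + 1) (by omega)]
      simp [List.length_take]
      omega

-- while name: … for ext in sorted(…): if low.endswith(ext): name = name[:-len(ext)]; break
def stripLoopA (name : List Char) : List Char :=
  if hne : name = [] then name
  else
    match extsA.find? (fun ext => PySem.Chars.endswith (PySem.Chars.lower name) ext.toList) with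
    | some ext => stripLoopA (PySem.List.slice name none (some (-(PySem.Str.len ext))))
    | none => name
termination_by name.length
decreasing_by
  have h := slice_to_neg_len_lt name ext.toList.length hne
  simpa [PySem.Str.len_eq] using h

def strip_known_archive_suffixes_py (filename : String) : String :=
  String.ofList (stripLoopA filename.toList)

-- ===== PORT B =====
-- _SINGLE of Source B: single-token extensions
def singleExts : PySem.Set (List Char) :=
  PySem.Set.ofList ["tgz".toList, "tar".toList, "zip".toList, "jar".toList, "bz2".toList, "whl".toList]

-- the while loop of Source B over the token list, seen from the back (parts[-1] = head of the
-- reversed list; parts.pop() = dropping that head); len(parts) >= 2 is the two-cons pattern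
def popLoopB : List (List Char) → List (List Char)
  | t :: p :: rest =>
      if PySem.Chars.lower t ∈ singleExts then popLoopB (p :: rest)
      else if (PySem.Chars.lower t = "gz".toList ∨ PySem.Chars.lower t = "xz".toList) ∧
              rest ≠ [] ∧ PySem.Chars.lower p = "tar".toList then popLoopB rest
      else t :: p :: rest
  | [] => []
  | [t] => [t]

-- filename.split(".") → List.splitOn '.'; ".".join(…) → List.intercalate ['.']
def strip_known_archive_suffixes_py_alt (filename : String) : String :=
  String.ofList (List.intercalate ['.'] (popLoopB ((filename.toList.splitOn '.').reverse)).reverse)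

-- ===== PRECONDITION & SPEC =====
def Spec_strip_known_archive_suffixes_py (filename : String) (out : String) : Prop := out = strip_known_archive_suffixes_py_alt filename
instance (filename : String) (out : String) : Decidable (Spec_strip_known_archive_suffixes_py filename out) := by unfold Spec_strip_known_archive_suffixes_py; infer_instance

-- ===== CLAIM (what is proved, stated in full; the proofs are below) =====
def Claim_equal_strip_known_archive_suffixes_py : Prop := ∀ (filename : String), Dom_strip_known_archive_suffixes_py filename → Spec_strip_known_archive_suffixes_py filename (strip_known_archive_suffixes_py filename)

-- ===== LEMMAS AND PROOFS =====

theorem extsA_eq : extsA = [".tar.bz2", ".tar.gz", ".tar.xz", ".tgz", ".tar", ".zip", ".jar", ".bz2", ".whl"] := by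
  decide

theorem stripLoopA_step (name : List Char) (hne : name ≠ []) (ext : String)
    (hfind : extsA.find? (fun e => PySem.Chars.endswith (PySem.Chars.lower name) e.toList) = some ext) :
    stripLoopA name = stripLoopA (PySem.List.slice name none (some (-(PySem.Str.len ext)))) := by
  rw [stripLoopA, dif_neg hne, hfind]

theorem stripLoopA_none (name : List Char) (hne : name ≠ [])
    (hfind : extsA.find? (fun e => PySem.Chars.endswith (PySem.Chars.lower name) e.toList) = none) :
    stripLoopA name = name := by
  rw [stripLoopA, dif_neg hne, hfind]

theorem lowerChar_eq_dot {c : Char} (h : PySem.Chars.lowerChar c = '.') : c = '.' := by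
  unfold PySem.Chars.lowerChar at h
  split at h
  · next hc =>
      unfold PySem.Chars.isupper at hc
      exfalso
      simp only [Bool.and_eq_true, decide_eq_true_eq, Char.le_def] at hc
      have hc' : 65 ≤ c.toNat ∧ c.toNat ≤ 90 := ⟨by exact_mod_cast hc.1, by exact_mod_cast hc.2⟩
      have h2 : (Char.ofNat (c.toNat + 32)).toNat = '.'.toNat := by rw [h]
      have hv : Nat.isValidChar (c.toNat + 32) := Or.inl (by omega)
      rw [Char.toNat_ofNat, if_pos hv] at h2
      have hd : ('.' : Char).toNat = 46 := by decide
      omega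
  · exact h

theorem dot_not_mem_lower {t : List Char} (ht : '.' ∉ t) : '.' ∉ PySem.Chars.lower t := by
  intro hm
  obtain ⟨c, hc, heq⟩ := List.mem_map.mp hm
  exact ht (lowerChar_eq_dot heq ▸ hc)

theorem suffix_block {W P lt e : List Char} (hlt : '.' ∉ lt) (he : '.' ∉ e) :
    P ++ '.' :: e <:+ W ++ '.' :: lt ↔ (e = lt ∧ P <:+ W) := by
  constructor
  · intro h
    have hs_e : '.' :: e <:+ W ++ '.' :: lt := (List.suffix_append P ('.' :: e)).trans h
    have hs_lt : '.' :: lt <:+ W ++ '.' :: lt := List.suffix_append W ('.' :: lt)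
    rcases Nat.lt_trichotomy e.length lt.length with hl | hl | hl
    · exfalso
      have hsub : '.' :: e <:+ '.' :: lt :=
        List.suffix_of_suffix_length_le hs_e hs_lt (by simp; omega)
      obtain ⟨u, hu⟩ := hsub
      cases u with
      | nil =>
          simp only [List.nil_append, List.cons.injEq] at hu
          exact absurd (congrArg List.length hu.2) (by omega)
      | cons c u =>
          have : u ++ '.' :: e = lt := by
            simpa using congrArg List.tail hu
          exact hlt (this ▸ (by simp : '.' ∈ u ++ '.' :: e))
    · have h1 := List.suffix_iff_eq_drop.mp hs_e
      have h2 := List.suffix_iff_eq_drop.mp hs_lt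
      have hlen : ('.' :: e).length = ('.' :: lt).length := by simp [hl]
      have heq : '.' :: e = '.' :: lt := by
        rw [h1]
        rw [hlen]
        exact h2.symm
      have he_lt : e = lt := by simpa using heq
      subst he_lt
      obtain ⟨u, hu⟩ := h
      rw [← List.append_assoc] at hu
      exact ⟨rfl, ⟨u, List.append_cancel_right hu⟩⟩
    · exfalso
      have hsub : '.' :: lt <:+ '.' :: e :=
        List.suffix_of_suffix_length_le hs_lt hs_e (by simp; omega)
      obtain ⟨u, hu⟩ := hsub
      cases u with
      | nil =>
          simp only [List.nil_append, List.cons.injEq] at hu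
          exact absurd (congrArg List.length hu.2) (by omega)
      | cons c u =>
          have : u ++ '.' :: lt = e := by
            simpa using congrArg List.tail hu
          exact he (this ▸ (by simp : '.' ∈ u ++ '.' :: lt))
  · rintro ⟨rfl, ⟨u, rfl⟩⟩
    exact ⟨u, by simp⟩

theorem lower_append_dot (X t : List Char) :
    PySem.Chars.lower (X ++ '.' :: t) = PySem.Chars.lower X ++ '.' :: PySem.Chars.lower t := by
  simp [PySem.Chars.lower, show PySem.Chars.lowerChar '.' = '.' from by decide]

theorem ends_iff_block (X t P e : List Char) (ht : '.' ∉ t) (he : '.' ∉ e) :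
    (PySem.Chars.endswith (PySem.Chars.lower (X ++ '.' :: t)) (P ++ '.' :: e) = true) ↔
      (e = PySem.Chars.lower t ∧ P <:+ PySem.Chars.lower X) := by
  rw [PySem.Chars.endswith_iff, lower_append_dot]
  exact suffix_block (dot_not_mem_lower ht) he

theorem inter_snoc (ys : List (List Char)) (t : List Char) (h : ys ≠ []) :
    List.intercalate ['.'] (ys ++ [t]) = List.intercalate ['.'] ys ++ '.' :: t := by
  induction ys with
  | nil => exact absurd rfl h
  | cons a ys ih =>
    cases ys with
    | nil => simp [List.intercalate]
    | cons b ys =>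
      have h2 := ih (by simp)
      simp only [List.cons_append, List.intercalate, List.intersperse_cons₂,
        List.flatten_cons] at h2 ⊢
      simp [h2]

theorem tar_sfx (p : List Char) (rest : List (List Char)) (hp : '.' ∉ p) :
    (".tar".toList <:+ PySem.Chars.lower (List.intercalate ['.'] ((p :: rest).reverse))) ↔
      (rest ≠ [] ∧ PySem.Chars.lower p = "tar".toList) := by
  cases rest with
  | nil =>
      have hone : List.intercalate ['.'] ([p] : List (List Char)) = p := by
        simp [List.intercalate]
      rw [show ([p] : List (List Char)).reverse = [p] from rfl, hone]
      constructor
      · intro h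
        exact absurd (h.subset (by decide : '.' ∈ ".tar".toList)) (dot_not_mem_lower hp)
      · rintro ⟨h, -⟩; exact absurd rfl h
  | cons q rest' =>
      have hrev : (p :: q :: rest').reverse = (q :: rest').reverse ++ [p] := by simp
      rw [hrev, inter_snoc _ _ (by simp), lower_append_dot,
        show ".tar".toList = [] ++ '.' :: "tar".toList from rfl,
        suffix_block (dot_not_mem_lower hp) (by decide)]
      constructor
      · rintro ⟨h, -⟩; exact ⟨by simp, h.symm⟩
      · rintro ⟨-, h⟩; exact ⟨h.symm, List.nil_suffix⟩

theorem splitOnP_no_p (p : Char → Bool) (xs : List Char) :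
    ∀ t ∈ xs.splitOnP p, ∀ x ∈ t, ¬ p x := by
  induction xs with
  | nil =>
      intro t ht
      rw [List.splitOnP_nil, List.mem_singleton] at ht
      subst ht; simp
  | cons a xs ih =>
      intro t ht
      rw [List.splitOnP_cons] at ht
      by_cases hpa : p a
      · rw [if_pos hpa] at ht
        rcases List.mem_cons.mp ht with rfl | h
        · simp
        · exact ih t h
      · rw [if_neg hpa] at ht
        obtain ⟨hd, tl, heq⟩ := List.exists_cons_of_ne_nil (List.splitOnP_ne_nil p xs)
        rw [heq, List.modifyHead_cons] at ht
        rcases List.mem_cons.mp ht with rfl | h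
        · intro x hx
          rcases List.mem_cons.mp hx with rfl | hx'
          · exact hpa
          · exact ih hd (heq ▸ List.mem_cons_self) x hx'
        · exact ih t (heq ▸ List.mem_cons_of_mem _ h)

theorem splitOn_dot_free (xs : List Char) : ∀ t ∈ xs.splitOn '.', '.' ∉ t := by
  intro t ht hm
  have := splitOnP_no_p (· == '.') xs t ht '.' hm
  simp at this

-- trailing-token characterizations of the nine endswith tests, one per extension shape,
-- then the lock-step simulation of A's character-level loop by B's token-level loop
theorem key_aux : ∀ (N : Nat) (rps : List (List Char)), rps.length ≤ N → rps ≠ [] →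
    (∀ u ∈ rps, '.' ∉ u) →
    stripLoopA (List.intercalate ['.'] rps.reverse) =
      List.intercalate ['.'] (popLoopB rps).reverse := by
  intro N
  induction N with
  | zero =>
      intro rps hlen hnil _
      cases rps with
      | nil => exact absurd rfl hnil
      | cons a l => simp at hlen
  | succ N ih =>
      intro rps hlen hnil hdf
      match rps with
      | [t] =>
          have ht : '.' ∉ t := hdf t (by simp)
          have hI : List.intercalate ['.'] [t].reverse = t := by simp [List.intercalate]
          have hB : popLoopB [t] = [t] := rfl
          rw [hI, hB, hI]
          by_cases htn : t = []
          · rw [stripLoopA, dif_pos htn]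
          · have hnone : extsA.find? (fun ext => PySem.Chars.endswith (PySem.Chars.lower t) ext.toList) = none := by
              rw [List.find?_eq_none]
              intro ext hext hc
              simp only [PySem.Chars.endswith_iff] at hc
              have hd : '.' ∈ ext.toList := by
                rw [extsA_eq] at hext
                fin_cases hext <;> decide
              exact (dot_not_mem_lower ht) (hc.subset hd)
            rw [stripLoopA_none t htn hnone]
      | t :: p :: rest =>
          have ht : '.' ∉ t := hdf t (by simp)
          have hp : '.' ∉ p := hdf p (by simp)
          have hrest : ∀ u ∈ rest, '.' ∉ u := fun u hu => hdf u (by simp [hu])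
          set lt := PySem.Chars.lower t with hlt
          set X := List.intercalate ['.'] ((p :: rest).reverse) with hX
          have hname : List.intercalate ['.'] ((t :: p :: rest).reverse) = X ++ '.' :: t := by
            rw [show (t :: p :: rest).reverse = (p :: rest).reverse ++ [t] from by simp,
              inter_snoc _ _ (by simp)]
          have hTP := tar_sfx p rest hp
          rw [← hX] at hTP
          -- per-extension characterizations
          have Esingle : ∀ e : List Char, '.' ∉ e →
              (PySem.Chars.endswith (PySem.Chars.lower (X ++ '.' :: t)) ('.' :: e) = true ↔ e = lt) := by
            intro e he
            rw [show ('.' :: e) = [] ++ '.' :: e from rfl, ends_iff_block X t [] e ht he, ← hlt]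
            simp [List.nil_suffix]
          have Ecomp : ∀ e : List Char, '.' ∉ e →
              (PySem.Chars.endswith (PySem.Chars.lower (X ++ '.' :: t)) (".tar".toList ++ '.' :: e) = true ↔
                (e = lt ∧ (rest ≠ [] ∧ PySem.Chars.lower p = "tar".toList))) := by
            intro e he
            rw [ends_iff_block X t ".tar".toList e ht he, hTP]
          have hlen_t : t.length = lt.length := by simp [hlt, PySem.Chars.lower]
          have hname_ne : X ++ '.' :: t ≠ [] := by simp
          rw [hname]
          by_cases hbz : lt = "bz2".toList ∧ rest ≠ [] ∧ PySem.Chars.lower p = "tar".toList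
          · -- A strips ".tar.bz2" (8 chars); B pops "bz2" then "tar"
            obtain ⟨hbz1, hrne, hptar⟩ := hbz
            obtain ⟨q, rest', rfl⟩ := List.exists_cons_of_ne_nil hrne
            have h1 : PySem.Chars.endswith (PySem.Chars.lower (X ++ '.' :: t)) ".tar.bz2".toList = true := by
              rw [show ".tar.bz2".toList = ".tar".toList ++ '.' :: "bz2".toList from rfl]
              exact (Ecomp "bz2".toList (by decide)).mpr ⟨hbz1.symm ▸ rfl, by simp, hptar⟩
            have hfind : extsA.find? (fun ext => PySem.Chars.endswith (PySem.Chars.lower (X ++ '.' :: t)) ext.toList) = some ".tar.bz2" := by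
              rw [extsA_eq]
              simp only [List.find?_cons, h1, cond_true]
            have hXz : X = List.intercalate ['.'] ((q :: rest').reverse) ++ '.' :: p := by
              rw [hX, show (p :: q :: rest').reverse = (q :: rest').reverse ++ [p] from by simp,
                inter_snoc _ _ (by simp)]
            have hlp : p.length = 3 := by
              have : (PySem.Chars.lower p).length = p.length := by simp [PySem.Chars.lower]
              rw [hptar] at this; simpa using this.symm
            have hlt3 : t.length = 3 := by
              rw [hlen_t, hbz1]; rfl
            have hslice : PySem.List.slice (X ++ '.' :: t) none (some (-(PySem.Str.len ".tar.bz2"))) =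
                List.intercalate ['.'] ((q :: rest').reverse) := by
              rw [show PySem.Str.len ".tar.bz2" = ((8 : Nat) : Int) from by decide,
                PySem.List.slice_to_neg_natCast _ 8 (by omega), hXz]
              rw [List.append_assoc]
              simp [List.length_append, hlp, hlt3]
            have hrec := ih (q :: rest') (by simp at hlen ⊢; omega) (by simp) (fun u hu => hrest u hu)
            have hBpop : popLoopB (t :: p :: q :: rest') = popLoopB (q :: rest') := by
              rw [popLoopB, if_pos (by rw [← hlt, hbz1]; decide), popLoopB,
                if_pos (by rw [hptar]; decide)]
            rw [stripLoopA_step _ hname_ne _ hfind, hslice, hrec, hBpop]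
          · by_cases hgz : (lt = "gz".toList ∨ lt = "xz".toList) ∧ rest ≠ [] ∧ PySem.Chars.lower p = "tar".toList
            · -- A strips ".tar.gz"/".tar.xz" (7 chars); B pops the token pair
              obtain ⟨hgx, hrne, hptar⟩ := hgz
              obtain ⟨q, rest', rfl⟩ := List.exists_cons_of_ne_nil hrne
              have h1 : PySem.Chars.endswith (PySem.Chars.lower (X ++ '.' :: t)) ".tar.bz2".toList = false := by
                rw [Bool.eq_false_iff]
                intro hc
                rw [show ".tar.bz2".toList = ".tar".toList ++ '.' :: "bz2".toList from rfl] at hc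
                have := ((Ecomp "bz2".toList (by decide)).mp hc).1
                rcases hgx with h | h <;> rw [h] at this <;> exact absurd this (by decide)
              have hXz : X = List.intercalate ['.'] ((q :: rest').reverse) ++ '.' :: p := by
                rw [hX, show (p :: q :: rest').reverse = (q :: rest').reverse ++ [p] from by simp,
                  inter_snoc _ _ (by simp)]
              have hlp : p.length = 3 := by
                have : (PySem.Chars.lower p).length = p.length := by simp [PySem.Chars.lower]
                rw [hptar] at this; simpa using this.symm
              have hlt2 : t.length = 2 := by
                rcases hgx with h | h <;> (rw [hlen_t, h]; rfl)
              have hslice : ∀ s : String, PySem.Str.len s = ((7 : Nat) : Int) →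
                  PySem.List.slice (X ++ '.' :: t) none (some (-(PySem.Str.len s))) =
                    List.intercalate ['.'] ((q :: rest').reverse) := by
                intro s hs
                rw [hs, PySem.List.slice_to_neg_natCast _ 7 (by omega), hXz]
                rw [List.append_assoc]
                simp [List.length_append, hlp, hlt2]
              have hrec := ih (q :: rest') (by simp at hlen ⊢; omega) (by simp) (fun u hu => hrest u hu)
              have hBpop : popLoopB (t :: p :: q :: rest') = popLoopB (q :: rest') := by
                rw [popLoopB, if_neg (by rw [← hlt]; rcases hgx with h | h <;> rw [h] <;> decide),
                  if_pos ⟨by rw [← hlt]; exact hgx, by simp, hptar⟩]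
              rcases hgx with hgx | hgx
              · have h2 : PySem.Chars.endswith (PySem.Chars.lower (X ++ '.' :: t)) ".tar.gz".toList = true := by
                  rw [show ".tar.gz".toList = ".tar".toList ++ '.' :: "gz".toList from rfl]
                  exact (Ecomp "gz".toList (by decide)).mpr ⟨hgx.symm ▸ rfl, by simp, hptar⟩
                have hfind : extsA.find? (fun ext => PySem.Chars.endswith (PySem.Chars.lower (X ++ '.' :: t)) ext.toList) = some ".tar.gz" := by
                  rw [extsA_eq]
                  simp only [List.find?_cons, h1, h2, cond_true, cond_false]
                rw [stripLoopA_step _ hname_ne _ hfind, hslice ".tar.gz" (by decide), hrec, hBpop]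
              · have h2 : PySem.Chars.endswith (PySem.Chars.lower (X ++ '.' :: t)) ".tar.gz".toList = false := by
                  rw [Bool.eq_false_iff]
                  intro hc
                  rw [show ".tar.gz".toList = ".tar".toList ++ '.' :: "gz".toList from rfl] at hc
                  have := ((Ecomp "gz".toList (by decide)).mp hc).1
                  rw [hgx] at this; exact absurd this (by decide)
                have h3 : PySem.Chars.endswith (PySem.Chars.lower (X ++ '.' :: t)) ".tar.xz".toList = true := by
                  rw [show ".tar.xz".toList = ".tar".toList ++ '.' :: "xz".toList from rfl]
                  exact (Ecomp "xz".toList (by decide)).mpr ⟨hgx.symm ▸ rfl, by simp, hptar⟩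
                have hfind : extsA.find? (fun ext => PySem.Chars.endswith (PySem.Chars.lower (X ++ '.' :: t)) ext.toList) = some ".tar.xz" := by
                  rw [extsA_eq]
                  simp only [List.find?_cons, h1, h2, h3, cond_true, cond_false]
                rw [stripLoopA_step _ hname_ne _ hfind, hslice ".tar.xz" (by decide), hrec, hBpop]
            · -- no composite strip; A and B agree on single-token strips / no-op
              have h1 : PySem.Chars.endswith (PySem.Chars.lower (X ++ '.' :: t)) ".tar.bz2".toList = false := by
                rw [Bool.eq_false_iff]
                intro hc
                rw [show ".tar.bz2".toList = ".tar".toList ++ '.' :: "bz2".toList from rfl] at hc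
                obtain ⟨he, htp⟩ := (Ecomp "bz2".toList (by decide)).mp hc
                exact hbz ⟨he.symm, htp⟩
              have h2 : PySem.Chars.endswith (PySem.Chars.lower (X ++ '.' :: t)) ".tar.gz".toList = false := by
                rw [Bool.eq_false_iff]
                intro hc
                rw [show ".tar.gz".toList = ".tar".toList ++ '.' :: "gz".toList from rfl] at hc
                obtain ⟨he, htp⟩ := (Ecomp "gz".toList (by decide)).mp hc
                exact hgz ⟨Or.inl he.symm, htp⟩
              have h3 : PySem.Chars.endswith (PySem.Chars.lower (X ++ '.' :: t)) ".tar.xz".toList = false := by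
                rw [Bool.eq_false_iff]
                intro hc
                rw [show ".tar.xz".toList = ".tar".toList ++ '.' :: "xz".toList from rfl] at hc
                obtain ⟨he, htp⟩ := (Ecomp "xz".toList (by decide)).mp hc
                exact hgz ⟨Or.inr he.symm, htp⟩
              by_cases hsing : lt ∈ singleExts
              · -- A strips the matching 4-char extension; B pops one token
                have hrec := ih (p :: rest) (by simp at hlen ⊢; omega) (by simp)
                  (fun u hu => hdf u (by simp at hu; rcases hu with h | h <;> simp [h]))
                have hBpop : popLoopB (t :: p :: rest) = popLoopB (p :: rest) := by
                  rw [popLoopB, if_pos hsing]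
                have hslice : ∀ s : String, PySem.Str.len s = ((4 : Nat) : Int) → t.length = 3 →
                    PySem.List.slice (X ++ '.' :: t) none (some (-(PySem.Str.len s))) = X := by
                  intro s hs hlt3
                  rw [hs, PySem.List.slice_to_neg_natCast _ 4 (by omega)]
                  simp [List.length_append, hlt3]
                have hsing' : lt = "tgz".toList ∨ lt = "tar".toList ∨ lt = "zip".toList ∨
                    lt = "jar".toList ∨ lt = "bz2".toList ∨ lt = "whl".toList := by
                  simpa [singleExts, PySem.Set.ofList] using hsing
                have hne4 : ∀ e : List Char, '.' ∉ e → e ≠ lt →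
                    PySem.Chars.endswith (PySem.Chars.lower (X ++ '.' :: t)) ('.' :: e) = false := by
                  intro e he hne
                  rw [Bool.eq_false_iff]
                  intro hc
                  exact hne ((Esingle e he).mp hc)
                rcases hsing' with hS | hS | hS | hS | hS | hS
                · have h4 : PySem.Chars.endswith (PySem.Chars.lower (X ++ '.' :: t)) ".tgz".toList = true :=
                    (Esingle "tgz".toList (by decide)).mpr hS.symm
                  have hfind : extsA.find? (fun ext => PySem.Chars.endswith (PySem.Chars.lower (X ++ '.' :: t)) ext.toList) = some ".tgz" := by
                    rw [extsA_eq]; simp only [List.find?_cons, h1, h2, h3, h4, cond_true, cond_false]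
                  rw [stripLoopA_step _ hname_ne _ hfind, hslice ".tgz" (by decide) (by rw [hlen_t, hS]; rfl), hrec, hBpop]
                · have h4 := hne4 "tgz".toList (by decide) (by rw [hS]; decide)
                  have h5 : PySem.Chars.endswith (PySem.Chars.lower (X ++ '.' :: t)) ".tar".toList = true :=
                    (Esingle "tar".toList (by decide)).mpr hS.symm
                  have hfind : extsA.find? (fun ext => PySem.Chars.endswith (PySem.Chars.lower (X ++ '.' :: t)) ext.toList) = some ".tar" := by
                    rw [extsA_eq]
                    simp only [List.find?_cons, h1, h2, h3,
                      show PySem.Chars.endswith (PySem.Chars.lower (X ++ '.' :: t)) ".tgz".toList = false from h4,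
                      h5, cond_true, cond_false]
                  rw [stripLoopA_step _ hname_ne _ hfind, hslice ".tar" (by decide) (by rw [hlen_t, hS]; rfl), hrec, hBpop]
                · have h4 := hne4 "tgz".toList (by decide) (by rw [hS]; decide)
                  have h5 := hne4 "tar".toList (by decide) (by rw [hS]; decide)
                  have h6 : PySem.Chars.endswith (PySem.Chars.lower (X ++ '.' :: t)) ".zip".toList = true :=
                    (Esingle "zip".toList (by decide)).mpr hS.symm
                  have hfind : extsA.find? (fun ext => PySem.Chars.endswith (PySem.Chars.lower (X ++ '.' :: t)) ext.toList) = some ".zip" := by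
                    rw [extsA_eq]
                    simp only [List.find?_cons, h1, h2, h3,
                      show PySem.Chars.endswith (PySem.Chars.lower (X ++ '.' :: t)) ".tgz".toList = false from h4,
                      show PySem.Chars.endswith (PySem.Chars.lower (X ++ '.' :: t)) ".tar".toList = false from h5,
                      h6, cond_true, cond_false]
                  rw [stripLoopA_step _ hname_ne _ hfind, hslice ".zip" (by decide) (by rw [hlen_t, hS]; rfl), hrec, hBpop]
                · have h4 := hne4 "tgz".toList (by decide) (by rw [hS]; decide)
                  have h5 := hne4 "tar".toList (by decide) (by rw [hS]; decide)
                  have h6 := hne4 "zip".toList (by decide) (by rw [hS]; decide)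
                  have h7 : PySem.Chars.endswith (PySem.Chars.lower (X ++ '.' :: t)) ".jar".toList = true :=
                    (Esingle "jar".toList (by decide)).mpr hS.symm
                  have hfind : extsA.find? (fun ext => PySem.Chars.endswith (PySem.Chars.lower (X ++ '.' :: t)) ext.toList) = some ".jar" := by
                    rw [extsA_eq]
                    simp only [List.find?_cons, h1, h2, h3,
                      show PySem.Chars.endswith (PySem.Chars.lower (X ++ '.' :: t)) ".tgz".toList = false from h4,
                      show PySem.Chars.endswith (PySem.Chars.lower (X ++ '.' :: t)) ".tar".toList = false from h5,
                      show PySem.Chars.endswith (PySem.Chars.lower (X ++ '.' :: t)) ".zip".toList = false from h6,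
                      h7, cond_true, cond_false]
                  rw [stripLoopA_step _ hname_ne _ hfind, hslice ".jar" (by decide) (by rw [hlen_t, hS]; rfl), hrec, hBpop]
                · have h4 := hne4 "tgz".toList (by decide) (by rw [hS]; decide)
                  have h5 := hne4 "tar".toList (by decide) (by rw [hS]; decide)
                  have h6 := hne4 "zip".toList (by decide) (by rw [hS]; decide)
                  have h7 := hne4 "jar".toList (by decide) (by rw [hS]; decide)
                  have h8 : PySem.Chars.endswith (PySem.Chars.lower (X ++ '.' :: t)) ".bz2".toList = true :=
                    (Esingle "bz2".toList (by decide)).mpr hS.symm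
                  have hfind : extsA.find? (fun ext => PySem.Chars.endswith (PySem.Chars.lower (X ++ '.' :: t)) ext.toList) = some ".bz2" := by
                    rw [extsA_eq]
                    simp only [List.find?_cons, h1, h2, h3,
                      show PySem.Chars.endswith (PySem.Chars.lower (X ++ '.' :: t)) ".tgz".toList = false from h4,
                      show PySem.Chars.endswith (PySem.Chars.lower (X ++ '.' :: t)) ".tar".toList = false from h5,
                      show PySem.Chars.endswith (PySem.Chars.lower (X ++ '.' :: t)) ".zip".toList = false from h6,
                      show PySem.Chars.endswith (PySem.Chars.lower (X ++ '.' :: t)) ".jar".toList = false from h7,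
                      h8, cond_true, cond_false]
                  rw [stripLoopA_step _ hname_ne _ hfind, hslice ".bz2" (by decide) (by rw [hlen_t, hS]; rfl), hrec, hBpop]
                · have h4 := hne4 "tgz".toList (by decide) (by rw [hS]; decide)
                  have h5 := hne4 "tar".toList (by decide) (by rw [hS]; decide)
                  have h6 := hne4 "zip".toList (by decide) (by rw [hS]; decide)
                  have h7 := hne4 "jar".toList (by decide) (by rw [hS]; decide)
                  have h8 := hne4 "bz2".toList (by decide) (by rw [hS]; decide)
                  have h9 : PySem.Chars.endswith (PySem.Chars.lower (X ++ '.' :: t)) ".whl".toList = true :=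
                    (Esingle "whl".toList (by decide)).mpr hS.symm
                  have hfind : extsA.find? (fun ext => PySem.Chars.endswith (PySem.Chars.lower (X ++ '.' :: t)) ext.toList) = some ".whl" := by
                    rw [extsA_eq]
                    simp only [List.find?_cons, h1, h2, h3,
                      show PySem.Chars.endswith (PySem.Chars.lower (X ++ '.' :: t)) ".tgz".toList = false from h4,
                      show PySem.Chars.endswith (PySem.Chars.lower (X ++ '.' :: t)) ".tar".toList = false from h5,
                      show PySem.Chars.endswith (PySem.Chars.lower (X ++ '.' :: t)) ".zip".toList = false from h6,
                      show PySem.Chars.endswith (PySem.Chars.lower (X ++ '.' :: t)) ".jar".toList = false from h7,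
                      show PySem.Chars.endswith (PySem.Chars.lower (X ++ '.' :: t)) ".bz2".toList = false from h8,
                      h9, cond_true, cond_false]
                  rw [stripLoopA_step _ hname_ne _ hfind, hslice ".whl" (by decide) (by rw [hlen_t, hS]; rfl), hrec, hBpop]
              · -- nothing matches: both loops stop
                have hne4 : ∀ e : List Char, '.' ∉ e → e ≠ lt →
                    PySem.Chars.endswith (PySem.Chars.lower (X ++ '.' :: t)) ('.' :: e) = false := by
                  intro e he hne
                  rw [Bool.eq_false_iff]
                  intro hc
                  exact hne ((Esingle e he).mp hc)
                have hnotS : ∀ e : List Char, e ∈ singleExts → e ≠ lt := by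
                  intro e he heq
                  exact hsing (heq ▸ he)
                have h4 := hne4 "tgz".toList (by decide) (hnotS _ (by decide))
                have h5 := hne4 "tar".toList (by decide) (hnotS _ (by decide))
                have h6 := hne4 "zip".toList (by decide) (hnotS _ (by decide))
                have h7 := hne4 "jar".toList (by decide) (hnotS _ (by decide))
                have h8 := hne4 "bz2".toList (by decide) (hnotS _ (by decide))
                have h9 := hne4 "whl".toList (by decide) (hnotS _ (by decide))
                have hfind : extsA.find? (fun ext => PySem.Chars.endswith (PySem.Chars.lower (X ++ '.' :: t)) ext.toList) = none := by
                  rw [extsA_eq]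
                  simp only [List.find?_cons, h1, h2, h3,
                    show PySem.Chars.endswith (PySem.Chars.lower (X ++ '.' :: t)) ".tgz".toList = false from h4,
                    show PySem.Chars.endswith (PySem.Chars.lower (X ++ '.' :: t)) ".tar".toList = false from h5,
                    show PySem.Chars.endswith (PySem.Chars.lower (X ++ '.' :: t)) ".zip".toList = false from h6,
                    show PySem.Chars.endswith (PySem.Chars.lower (X ++ '.' :: t)) ".jar".toList = false from h7,
                    show PySem.Chars.endswith (PySem.Chars.lower (X ++ '.' :: t)) ".bz2".toList = false from h8,
                    show PySem.Chars.endswith (PySem.Chars.lower (X ++ '.' :: t)) ".whl".toList = false from h9,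
                    cond_false, List.find?_nil]
                have hBpop : popLoopB (t :: p :: rest) = t :: p :: rest := by
                  rw [popLoopB, if_neg hsing, if_neg]
                  rintro ⟨hgx, hrne, hptar⟩
                  exact hgz ⟨hgx, hrne, hptar⟩
                rw [stripLoopA_none _ hname_ne hfind, hBpop]
                exact hname.symm

-- ===== VERDICT (by name: the statement is the Claim_ definition above) =====
theorem strip_known_archive_suffixes_py_spec : Claim_equal_strip_known_archive_suffixes_py := by
  intro filename _
  unfold Spec_strip_known_archive_suffixes_py strip_known_archive_suffixes_py strip_known_archive_suffixes_py_alt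
  set cs := filename.toList with hcs
  set ps := cs.splitOn '.' with hps
  have hne : ps ≠ [] := by
    rw [hps]
    unfold List.splitOn
    exact List.splitOnP_ne_nil _ cs
  have hdf : ∀ u ∈ ps.reverse, '.' ∉ u := by
    intro u hu
    exact splitOn_dot_free cs u (List.mem_reverse.mp hu)
  have h := key_aux ps.reverse.length ps.reverse le_rfl (by simpa) hdf
  rw [List.reverse_reverse] at h
  rw [show List.intercalate ['.'] ps = cs from List.intercalate_splitOn cs '.'] at h
  rw [h]
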